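-- pv_equiv track=rewrite | github.com/CodeLyokoZ/lab_Ex | lab12.1.py | get_mutation
-- ===== SOURCE A (Python) =====
-- def get_mutation(ancestor, child): # funtion for get mutation insertation & spot change
--     if ancestor == child: # if ancestor equal to child
--         return [[0, 0, 1]] # nothing have to change
--
--     if len(ancestor) == 1: # if ancector's last letter
--         deffer = len(child) - len(ancestor) # get deffernt between ancector & child length
--         if deffer < 0: # if differnt is minus
--             return [[0, 0, 0]] # return impossibility
--         elif deffer > 0: # if deferent is positive
--             if ancestor[0] == child[0]: # ancector & child first lettor is equal
--                 return [[0, deffer, 1]] # retern as 0 insersation & value of differnt is spot changes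
--             else:
--                 return [[1, deffer - 1, 1]] # # retern as 1 insersation & value of (differnt - 1) is spot changes
--         else : # if defernt is 0
--             return [[1, 0, 1]] # return one insersation
--
--     mute = [] # create mutation value list
--     if ancestor[0] == child[0]: # ancector & child first lettor is equal
--         mute += [i for i in get_mutation(ancestor[1:], child[1:]) if i[2] == 1] # get inserstion & spot changes using recursively
--     else:
--         mute += [[i[0] + 1, i[1], 1] for i in get_mutation(ancestor[1:], child[1:]) if i[2] == 1] # get inserstion & spot changes using recursively
--
--         if len(ancestor) != len(child): # if length not equal
--             mute += [[i[0], i[1] + 1, 1] for i in get_mutation(ancestor, child[1:]) if i[2] == 1]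
--
--     return mute # return final mutation list
-- ===== SOURCE B (Python) =====
-- def get_mutation(ancestor, child):
--     # Memoized top-down DP over (i, j) suffix-index pairs: each distinct
--     # (ancestor[i:], child[j:]) subproblem is solved once instead of
--     # exponentially many times.
--     n, m = len(ancestor), len(child)
--     memo = {}
--
--     def solve(i, j):
--         if (i, j) in memo:
--             return memo[(i, j)]
--         if ancestor[i:] == child[j:]:
--             r = [[0, 0, 1]]
--         elif n - i == 1:
--             d = m - j - 1
--             if d < 0:
--                 r = [[0, 0, 0]]
--             elif d > 0:
--                 r = [[0, d, 1]] if ancestor[i] == child[j] else [[1, d - 1, 1]]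
--             else:
--                 r = [[1, 0, 1]]
--         elif ancestor[i] == child[j]:
--             r = [t for t in solve(i + 1, j + 1) if t[2] == 1]
--         elif n - i != m - j:
--             r = [[t[0] + 1, t[1], 1] for t in solve(i + 1, j + 1) if t[2] == 1]
--             r += [[t[0], t[1] + 1, 1] for t in solve(i, j + 1) if t[2] == 1]
--         else:
--             r = [[t[0] + 1, t[1], 1] for t in solve(i + 1, j + 1) if t[2] == 1]
--         memo[(i, j)] = r
--         return r
--
--     return solve(0, 0)
-- ===== Notes on version B (the rewrite author's own statement) =====
-- stated objective: faster
-- what changed: Replaces A's naive recursion on string slices (which re-solves the same (suffix, suffix) subproblem many times) with a memoized top-down DP over (i, j) suffix-index pairs, each subproblem solved once.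
import Mathlib
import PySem

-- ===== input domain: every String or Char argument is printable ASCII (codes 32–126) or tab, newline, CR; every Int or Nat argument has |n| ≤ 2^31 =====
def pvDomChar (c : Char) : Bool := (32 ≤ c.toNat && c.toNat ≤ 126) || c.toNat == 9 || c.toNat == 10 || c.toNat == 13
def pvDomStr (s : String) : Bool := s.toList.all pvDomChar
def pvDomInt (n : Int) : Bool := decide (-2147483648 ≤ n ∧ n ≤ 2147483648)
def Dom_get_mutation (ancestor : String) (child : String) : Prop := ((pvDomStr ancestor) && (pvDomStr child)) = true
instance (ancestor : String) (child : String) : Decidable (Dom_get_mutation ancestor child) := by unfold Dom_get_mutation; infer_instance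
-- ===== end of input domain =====

-- B re-implements A's naive string-slicing recursion as a memoized top-down DP over
-- (i, j) suffix-index pairs (each subproblem solved once); alternative structure, return value identical on Pre_.

-- ===== PORT A =====
-- [i for i in l if i[2] == 1]  (the guard i[2] == 1; every entry A builds has length 3, so pyGet? is exact)
def pvFiltA (l : List (List Int)) : List (List Int) :=
  l.filter (fun i => PySem.List.pyGet? i 2 = some 1)

-- literal transliteration of A on the code-point lists; where Python raises IndexError
-- (empty ancestor/child reached with the other side non-trivial) the port returns [] — outside Pre_.
def gmA (xs ys : List Char) : List (List Int) :=
  if xs = ys then [[0, 0, 1]]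
  else if xs.length = 1 then
    let d : Int := (ys.length : Int) - (xs.length : Int)
    if d < 0 then [[0, 0, 0]]
    else if d > 0 then
      if PySem.List.pyGet? xs 0 = PySem.List.pyGet? ys 0 then [[0, d, 1]]
      else [[1, d - 1, 1]]
    else [[1, 0, 1]]
  else
    match xs, ys with
    | ha :: ta, hc :: tc =>
      if ha = hc then pvFiltA (gmA ta tc)
      else
        (pvFiltA (gmA ta tc)).map
            (fun i => [PySem.List.pyGetD i 0 0 + 1, PySem.List.pyGetD i 1 0, 1]) ++
          (if (ha :: ta).length ≠ (hc :: tc).length then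
            (pvFiltA (gmA (ha :: ta) tc)).map
              (fun i => [PySem.List.pyGetD i 0 0, PySem.List.pyGetD i 1 0 + 1, 1])
          else [])
    | _, _ => []  -- ancestor[0] / child[0] IndexError in Python; outside Pre_
termination_by ys.length
decreasing_by all_goals simp

def get_mutation (ancestor : String) (child : String) : List (List Int) :=
  gmA ancestor.toList child.toList

-- ===== PORT B =====
-- [t for t in l if t[2] == 1]
def pvFiltB (l : List (List Int)) : List (List Int) :=
  l.filter (fun t => PySem.List.pyGet? t 2 = some 1)

-- Source B's solve(i, j): memoized recursion over index pairs; the memo dict is threaded through.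
-- Where Python would raise IndexError (out-of-range ancestor[i]/child[j]) the port returns [] — outside Pre_.
def gmBsolve (xs ys : List Char) (i j : Nat)
    (memo : PySem.Dict (Nat × Nat) (List (List Int))) :
    List (List Int) × PySem.Dict (Nat × Nat) (List (List Int)) :=
  match memo.get? (i, j) with
  | some r => (r, memo)
  | none =>
    if xs.drop i = ys.drop j then
      ([[0, 0, 1]], memo.insert (i, j) [[0, 0, 1]])
    else if (xs.length : Int) - (i : Int) = 1 then
      let d : Int := (ys.length : Int) - (j : Int) - 1
      let r : List (List Int) :=
        if d < 0 then [[0, 0, 0]]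
        else if d > 0 then
          if PySem.List.pyGet? xs (i : Int) = PySem.List.pyGet? ys (j : Int) then [[0, d, 1]]
          else [[1, d - 1, 1]]
        else [[1, 0, 1]]
      (r, memo.insert (i, j) r)
    else
      if hj : j < ys.length then  -- child[j] would raise IndexError otherwise; outside Pre_
        if hi : i < xs.length then  -- ancestor[i] would raise IndexError otherwise; outside Pre_
          if xs[i] = ys[j] then
            let p := gmBsolve xs ys (i + 1) (j + 1) memo
            let r := pvFiltB p.1
            (r, p.2.insert (i, j) r)
          else if (xs.length : Int) - (i : Int) ≠ (ys.length : Int) - (j : Int) then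
            let p := gmBsolve xs ys (i + 1) (j + 1) memo
            let q := gmBsolve xs ys i (j + 1) p.2
            let r := (pvFiltB p.1).map
                (fun t => [PySem.List.pyGetD t 0 0 + 1, PySem.List.pyGetD t 1 0, 1]) ++
              (pvFiltB q.1).map
                (fun t => [PySem.List.pyGetD t 0 0, PySem.List.pyGetD t 1 0 + 1, 1])
            (r, q.2.insert (i, j) r)
          else
            let p := gmBsolve xs ys (i + 1) (j + 1) memo
            let r := (pvFiltB p.1).map
              (fun t => [PySem.List.pyGetD t 0 0 + 1, PySem.List.pyGetD t 1 0, 1])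
            (r, p.2.insert (i, j) r)
        else ([], memo)
      else ([], memo)
termination_by ys.length + 1 - j
decreasing_by all_goals omega

def get_mutation_alt (ancestor : String) (child : String) : List (List Int) :=
  (gmBsolve ancestor.toList child.toList 0 0 PySem.Dict.empty).1

-- ===== PRECONDITION & SPEC =====
-- Pre_ excludes exactly the inputs on which A raises IndexError: an empty ancestor with a
-- different child, or an ancestor of length ≥ 2 whose child is shorter, unless the child is
-- exactly the ancestor minus its last letter (then the recursion bottoms out safely).
def Pre_get_mutation (ancestor : String) (child : String) : Prop :=
  ancestor.toList = child.toList ∨ ancestor.toList.length = 1 ∨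
    (2 ≤ ancestor.toList.length ∧
      (ancestor.toList.length ≤ child.toList.length ∨
        (child.toList.length + 1 = ancestor.toList.length ∧
          child.toList = ancestor.toList.take child.toList.length)))
instance (ancestor : String) (child : String) : Decidable (Pre_get_mutation ancestor child) := by
  unfold Pre_get_mutation; infer_instance

def pvWitness_get_mutation : String × String := ("ab", "axc")

def Spec_get_mutation (ancestor : String) (child : String) (out : List (List Int)) : Prop :=
  out = get_mutation_alt ancestor child
instance (ancestor : String) (child : String) (out : List (List Int)) :
    Decidable (Spec_get_mutation ancestor child out) := by
  unfold Spec_get_mutation; infer_instance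

-- ===== CLAIM (what is proved, stated in full; the proofs are below) =====
def Claim_equal_get_mutation : Prop :=
  ∀ (ancestor : String) (child : String), Dom_get_mutation ancestor child →
    Pre_get_mutation ancestor child →
    Spec_get_mutation ancestor child (get_mutation ancestor child)

-- ===== LEMMAS AND PROOFS =====

-- the memo invariant: every stored value is A's answer on the corresponding suffixes
def pvInv (xs ys : List Char) (memo : PySem.Dict (Nat × Nat) (List (List Int))) : Prop :=
  ∀ i j r, memo.get? (i, j) = some r → r = gmA (xs.drop i) (ys.drop j)

theorem pvInv_insert (xs ys : List Char) (i j : Nat)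
    (memo : PySem.Dict (Nat × Nat) (List (List Int))) (r : List (List Int))
    (hinv : pvInv xs ys memo) (hr : r = gmA (xs.drop i) (ys.drop j)) :
    pvInv xs ys (memo.insert (i, j) r) := by
  intro i' j' r' h
  rw [PySem.Dict.get?_insert] at h
  split at h
  · rename_i heq
    injection heq with h1 h2
    injection h with h3
    subst h1; subst h2; subst h3
    exact hr
  · exact hinv i' j' r' h

-- A's value at a state of length-1 ancestor suffix, written with B's index arithmetic
theorem gmA_base (xs ys : List Char) (i j : Nat)
    (h1 : xs.drop i ≠ ys.drop j) (h2 : (xs.length : Int) - (i : Int) = 1) :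
    gmA (xs.drop i) (ys.drop j) =
      (if (ys.length : Int) - (j : Int) - 1 < 0 then [[0, 0, 0]]
       else if (ys.length : Int) - (j : Int) - 1 > 0 then
         (if PySem.List.pyGet? xs (i : Int) = PySem.List.pyGet? ys (j : Int) then
            [[0, (ys.length : Int) - (j : Int) - 1, 1]]
          else [[1, (ys.length : Int) - (j : Int) - 1 - 1, 1]])
       else [[1, 0, 1]]) := by
  have hia : i < xs.length := by omega
  have hlen1 : (xs.drop i).length = 1 := by simp; omega
  rw [gmA.eq_def, if_neg h1, if_pos hlen1]
  simp only [hlen1, List.length_drop]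
  by_cases hd0 : (ys.length : Int) - (j : Int) - 1 < 0
  · rw [if_pos (by push_cast; omega), if_pos hd0]
  · rw [if_neg (by push_cast; omega), if_neg hd0]
    have hjc : j < ys.length := by omega
    by_cases hdp : (ys.length : Int) - (j : Int) - 1 > 0
    · rw [if_pos (by push_cast; omega), if_pos hdp]
      have hh : PySem.List.pyGet? (xs.drop i) 0 = PySem.List.pyGet? xs (i : Int) := by
        simp [PySem.List.pyGet?_zero, List.getElem?_drop]
      have hh2 : PySem.List.pyGet? (ys.drop j) 0 = PySem.List.pyGet? ys (j : Int) := by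
        simp [PySem.List.pyGet?_zero, List.getElem?_drop]
      rw [hh, hh2]
      split
      · (congr 3) <;> (push_cast; omega)
      · (congr 3) <;> (push_cast; omega)
    · rw [if_neg (by push_cast; omega), if_neg hdp]

-- A's port at a state where Python would raise IndexError returns []
theorem gmA_junk_left (xs ys : List Char) (i j : Nat)
    (h1 : xs.drop i ≠ ys.drop j) (_h2 : (xs.length : Int) - (i : Int) ≠ 1)
    (hx : xs.drop i = []) : gmA (xs.drop i) (ys.drop j) = [] := by
  rw [gmA.eq_def, if_neg h1, if_neg (by simp [hx]), hx]

theorem gmA_junk_right (xs ys : List Char) (i j : Nat)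
    (h1 : xs.drop i ≠ ys.drop j) (h2 : (xs.length : Int) - (i : Int) ≠ 1)
    (hia : i < xs.length) (hy : ys.drop j = []) : gmA (xs.drop i) (ys.drop j) = [] := by
  have hlen : (xs.drop i).length ≠ 1 := by simp; omega
  rw [gmA.eq_def, if_neg h1, if_neg hlen, hy]
  rcases ha : xs.drop i with _ | ⟨ha0, ta⟩ <;> rfl

theorem pvSolve_spec (xs ys : List Char) (i j : Nat)
    (memo : PySem.Dict (Nat × Nat) (List (List Int))) :
    pvInv xs ys memo →
    (gmBsolve xs ys i j memo).1 = gmA (xs.drop i) (ys.drop j) ∧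
      pvInv xs ys (gmBsolve xs ys i j memo).2 := by
  suffices h : ∀ (N i j : Nat) (memo : PySem.Dict (Nat × Nat) (List (List Int))),
      ys.length + 1 - j = N → pvInv xs ys memo →
      (gmBsolve xs ys i j memo).1 = gmA (xs.drop i) (ys.drop j) ∧
        pvInv xs ys (gmBsolve xs ys i j memo).2 by
    exact h _ i j memo rfl
  intro N
  induction N using Nat.strong_induction_on with
  | _ N ih =>
    intro i j memo hN hinv
    rw [gmBsolve.eq_def]
    cases hmem : PySem.Dict.get? memo (i, j) with
    | some r =>
      exact ⟨hinv _ _ _ hmem, hinv⟩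
    | none =>
      by_cases h1 : xs.drop i = ys.drop j
      · simp only [if_pos h1]
        have hr : [[(0 : Int), 0, 1]] = gmA (xs.drop i) (ys.drop j) := by
          rw [gmA.eq_def, if_pos h1]
        exact ⟨hr, pvInv_insert xs ys i j memo _ hinv hr⟩
      · simp only [if_neg h1]
        by_cases h2 : (xs.length : Int) - (i : Int) = 1
        · simp only [if_pos h2]
          have hg := (gmA_base xs ys i j h1 h2).symm
          exact ⟨hg, pvInv_insert xs ys i j memo _ hinv hg⟩
        · simp only [if_neg h2]
          by_cases hj : j < ys.length
          · rw [dif_pos hj]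
            by_cases hi : i < xs.length
            · rw [dif_pos hi]
              have hda : xs.drop i = xs[i] :: xs.drop (i + 1) := List.drop_eq_getElem_cons hi
              have hdc : ys.drop j = ys[j] :: ys.drop (j + 1) := List.drop_eq_getElem_cons hj
              have hlen : ¬(xs.drop i).length = 1 := by simp; omega
              have IH := ih (ys.length + 1 - (j + 1)) (by omega) (i + 1) (j + 1) memo rfl hinv
              by_cases hxy : xs[i] = ys[j]
              · rw [if_pos hxy]
                have hr : pvFiltB (gmBsolve xs ys (i + 1) (j + 1) memo).1 =
                    gmA (xs.drop i) (ys.drop j) := by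
                  conv_rhs => rw [gmA.eq_def]
                  rw [if_neg h1, if_neg hlen, hda, hdc]
                  simp only [if_pos hxy]
                  rw [IH.1]
                  rfl
                exact ⟨hr, pvInv_insert xs ys i j _ _ IH.2 hr⟩
              · rw [if_neg hxy]
                by_cases hgl : (xs.length : Int) - (i : Int) ≠ (ys.length : Int) - (j : Int)
                · rw [if_pos hgl]
                  have IH2 := ih (ys.length + 1 - (j + 1)) (by omega) i (j + 1)
                    (gmBsolve xs ys (i + 1) (j + 1) memo).2 rfl IH.2
                  have hr : (pvFiltB (gmBsolve xs ys (i + 1) (j + 1) memo).1).map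
                        (fun t => [PySem.List.pyGetD t 0 0 + 1, PySem.List.pyGetD t 1 0, 1]) ++
                      (pvFiltB (gmBsolve xs ys i (j + 1)
                          (gmBsolve xs ys (i + 1) (j + 1) memo).2).1).map
                        (fun t => [PySem.List.pyGetD t 0 0, PySem.List.pyGetD t 1 0 + 1, 1]) =
                      gmA (xs.drop i) (ys.drop j) := by
                    conv_rhs => rw [gmA.eq_def]
                    rw [if_neg h1, if_neg hlen, hda, hdc]
                    simp only [if_neg hxy]
                    rw [if_pos (by simp; omega)]
                    rw [IH.1, IH2.1, ← hda]
                    rfl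
                  exact ⟨hr, pvInv_insert xs ys i j _ _ IH2.2 hr⟩
                · rw [if_neg hgl]
                  have hr : (pvFiltB (gmBsolve xs ys (i + 1) (j + 1) memo).1).map
                        (fun t => [PySem.List.pyGetD t 0 0 + 1, PySem.List.pyGetD t 1 0, 1]) =
                      gmA (xs.drop i) (ys.drop j) := by
                    conv_rhs => rw [gmA.eq_def]
                    rw [if_neg h1, if_neg hlen, hda, hdc]
                    simp only [if_neg hxy]
                    rw [if_neg (by simp; omega)]
                    rw [IH.1, List.append_nil]
                    rfl
                  exact ⟨hr, pvInv_insert xs ys i j _ _ IH.2 hr⟩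
            · rw [dif_neg hi]
              have hd : xs.drop i = [] := by rw [List.drop_eq_nil_iff]; omega
              exact ⟨(gmA_junk_left xs ys i j h1 h2 hd).symm, hinv⟩
          · rw [dif_neg hj]
            have hd : ys.drop j = [] := by rw [List.drop_eq_nil_iff]; omega
            by_cases hi : i < xs.length
            · exact ⟨(gmA_junk_right xs ys i j h1 h2 hi hd).symm, hinv⟩
            · have hd2 : xs.drop i = [] := by rw [List.drop_eq_nil_iff]; omega
              exact ⟨(gmA_junk_left xs ys i j h1 h2 hd2).symm, hinv⟩

theorem get_mutation_spec : Claim_equal_get_mutation := by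
  intro ancestor child _ _
  unfold Spec_get_mutation get_mutation get_mutation_alt
  have h := pvSolve_spec ancestor.toList child.toList 0 0 PySem.Dict.empty
    (by intro i j r hr; simp [PySem.Dict.empty, PySem.Dict.get?] at hr)
  simp at h
  exact h.1.symm
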